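-- pv_equiv track=rewrite | github.com/jonnyhoo/kiro-gateway | kiro/streaming_anthropic.py | _find_earliest_stop_sequence
-- ===== SOURCE A (Python) =====
-- from typing import TYPE_CHECKING, AsyncGenerator, Dict, List, Optional, Any
--
-- def _find_earliest_stop_sequence(
--     text: str, stop_sequences: Optional[List[str]]
-- ) -> Optional[tuple[int, str]]:
--     """Return the earliest matching stop sequence in visible text."""
--     earliest_match: Optional[tuple[int, str]] = None
--
--     for sequence in stop_sequences or []:
--         if not sequence:
--             continue
--         index = text.find(sequence)
--         if index < 0:
--             continue
--         if earliest_match is None or index < earliest_match[0]: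
--             earliest_match = (index, sequence)
--
--     return earliest_match
-- ===== SOURCE B (Python) =====
-- from typing import List, Optional
--
--
-- def _find_earliest_stop_sequence(
--     text: str, stop_sequences: Optional[List[str]]
-- ) -> Optional[tuple[int, str]]:
--     """Return the earliest matching stop sequence in visible text.
--
--     Position-major scan: walk text positions left to right and return at the
--     first position where some (non-empty) stop sequence starts, taking the
--     first such sequence in list order.
--     """
--     sequences = stop_sequences or []
--     for i in range(len(text)):
--         for seq in sequences:
--             if seq and text.startswith(seq, i):
--                 return (i, seq)
--     return None
-- ===== Notes on version B (the rewrite author's own statement) =====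
-- stated objective: alternative
-- what changed: B inverts the loop nesting: instead of computing str.find for every sequence and keeping the minimum index with first-in-list tie-break, B scans text positions left to right and returns at the first position where some non-empty sequence starts (first in list order), which allows early exit at the earliest match.
import Mathlib
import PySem

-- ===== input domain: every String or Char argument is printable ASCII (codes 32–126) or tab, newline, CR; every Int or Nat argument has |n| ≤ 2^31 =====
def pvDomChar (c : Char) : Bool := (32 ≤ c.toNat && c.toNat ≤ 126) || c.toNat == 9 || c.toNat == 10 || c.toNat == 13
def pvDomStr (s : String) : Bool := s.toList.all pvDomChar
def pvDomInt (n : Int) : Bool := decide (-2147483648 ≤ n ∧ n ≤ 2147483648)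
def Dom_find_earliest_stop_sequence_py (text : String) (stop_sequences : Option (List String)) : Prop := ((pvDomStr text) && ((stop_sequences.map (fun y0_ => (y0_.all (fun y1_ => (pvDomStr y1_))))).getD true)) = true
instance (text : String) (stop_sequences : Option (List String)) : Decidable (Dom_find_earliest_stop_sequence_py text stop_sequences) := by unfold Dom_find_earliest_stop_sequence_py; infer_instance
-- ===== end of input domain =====

-- B replaces A's per-sequence str.find + running-minimum scan by a position-major
-- scan of the text that returns at the first position where some non-empty stop
-- sequence starts (objective: alternative decomposition; same return value).

-- ===== PORT A =====
-- 'for sequence in stop_sequences or []' with the running earliest_match accumulator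
def pvAFold (t : String) : List String → Option (Int × String) → Option (Int × String)
  | [], em => em
  | s :: rest, em =>
      if s = "" then pvAFold t rest em               -- 'if not sequence: continue'
      else
        let idx := PySem.Str.find t s                -- 'index = text.find(sequence)'
        if idx < 0 then pvAFold t rest em            -- 'if index < 0: continue'
        -- 'if earliest_match is None or index < earliest_match[0]'
        else if em.elim true (fun p => decide (idx < p.1)) then pvAFold t rest (some (idx, s))
        else pvAFold t rest em

def find_earliest_stop_sequence_py (text : String) (stop_sequences : Option (List String)) : Option (Int × String) :=
  pvAFold text (match stop_sequences with | none => [] | some l => l) none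

-- ===== PORT B =====
-- inner loop: 'for seq in sequences: if seq and text.startswith(seq, i): return seq-hit'
-- text.startswith(seq, i) on 0 ≤ i is exactly: seq is a prefix of text from position i
def pvAltInner (t : List Char) (i : Nat) : List String → Option String
  | [] => none
  | s :: rest =>
      if s ≠ "" ∧ PySem.Chars.startswith (t.drop i) s.toList then some s
      else pvAltInner t i rest

-- outer loop: 'for i in range(len(text))', i ascending, rem positions remaining
def pvAltOuter (t : List Char) (seqs : List String) : Nat → Nat → Option (Int × String)
  | _, 0 => none
  | i, rem + 1 =>
      match pvAltInner t i seqs with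
      | some s => some ((i : Int), s)
      | none => pvAltOuter t seqs (i + 1) rem

def find_earliest_stop_sequence_py_alt (text : String) (stop_sequences : Option (List String)) : Option (Int × String) :=
  pvAltOuter text.toList (match stop_sequences with | none => [] | some l => l) 0 text.toList.length

-- ===== PRECONDITION & SPEC =====
def Spec_find_earliest_stop_sequence_py (text : String) (stop_sequences : Option (List String)) (out : Option (Int × String)) : Prop := out = find_earliest_stop_sequence_py_alt text stop_sequences
instance (text : String) (stop_sequences : Option (List String)) (out : Option (Int × String)) : Decidable (Spec_find_earliest_stop_sequence_py text stop_sequences out) := by unfold Spec_find_earliest_stop_sequence_py; infer_instance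

-- ===== CLAIM (what is proved, stated in full; the proofs are below) =====
def Claim_equal_find_earliest_stop_sequence_py : Prop := ∀ (text : String) (stop_sequences : Option (List String)), Dom_find_earliest_stop_sequence_py text stop_sequences → Spec_find_earliest_stop_sequence_py text stop_sequences (find_earliest_stop_sequence_py text stop_sequences)

-- ===== LEMMAS AND PROOFS =====

-- 'cond s at position i' — what B's inner test checks
def pvCond (t : List Char) (i : Nat) (s : String) : Prop :=
  s ≠ "" ∧ s.toList <+: t.drop i

lemma pvInner_none {t : List Char} {i : Nat} : ∀ {seqs : List String},
    pvAltInner t i seqs = none → ∀ s ∈ seqs, ¬ pvCond t i s := by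
  intro seqs
  induction seqs with
  | nil => intro _ s hs; simp at hs
  | cons a rest ih =>
      intro h s hs
      simp only [pvAltInner] at h
      split at h
      · exact absurd h (by simp)
      · next hc =>
          rcases List.mem_cons.mp hs with rfl | hs'
          · rintro ⟨h1, h2⟩
            exact hc ⟨h1, (PySem.Chars.startswith_iff _ _).mpr h2⟩
          · exact ih h s hs'

lemma pvInner_some {t : List Char} {i : Nat} {s : String} : ∀ {seqs : List String},
    pvAltInner t i seqs = some s →
    pvCond t i s ∧ ∃ pre post, seqs = pre ++ s :: post ∧ ∀ s' ∈ pre, ¬ pvCond t i s' := by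
  intro seqs
  induction seqs with
  | nil => intro h; simp [pvAltInner] at h
  | cons a rest ih =>
      intro h
      simp only [pvAltInner] at h
      split at h
      · next hc =>
          cases h
          refine ⟨⟨hc.1, (PySem.Chars.startswith_iff _ _).mp hc.2⟩, [], rest, rfl, ?_⟩
          intro s' hs'; simp at hs'
      · next hc =>
          obtain ⟨hcond, pre, post, hdec, hpre⟩ := ih h
          refine ⟨hcond, a :: pre, post, by rw [hdec]; rfl, ?_⟩
          intro s' hs'
          rcases List.mem_cons.mp hs' with rfl | hs''
          · rintro ⟨h1, h2⟩
            exact hc ⟨h1, (PySem.Chars.startswith_iff _ _).mpr h2⟩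
          · exact hpre s' hs''

lemma pvOuter_none {t : List Char} {seqs : List String} :
    ∀ {rem i : Nat}, pvAltOuter t seqs i rem = none →
      ∀ k, i ≤ k → k < i + rem → pvAltInner t k seqs = none := by
  intro rem
  induction rem with
  | zero => intro i _ k h1 h2; omega
  | succ rem ih =>
      intro i h k h1 h2
      simp only [pvAltOuter] at h
      cases hin : pvAltInner t i seqs with
      | some s => rw [hin] at h; exact absurd h (by simp)
      | none =>
          rw [hin] at h
          rcases Nat.eq_or_lt_of_le h1 with rfl | hlt
          · exact hin
          · exact ih h k hlt (by omega)

lemma pvOuter_some {t : List Char} {seqs : List String} :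
    ∀ {rem i : Nat} {r : Int × String}, pvAltOuter t seqs i rem = some r →
      ∃ jN : Nat, r.1 = (jN : Int) ∧ i ≤ jN ∧ jN < i + rem ∧
        pvAltInner t jN seqs = some r.2 ∧ ∀ k, i ≤ k → k < jN → pvAltInner t k seqs = none := by
  intro rem
  induction rem with
  | zero => intro i r h; simp [pvAltOuter] at h
  | succ rem ih =>
      intro i r h
      simp only [pvAltOuter] at h
      cases hin : pvAltInner t i seqs with
      | some s =>
          rw [hin] at h
          cases h
          exact ⟨i, rfl, le_refl i, by omega, hin, fun k hk1 hk2 => by omega⟩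
      | none =>
          rw [hin] at h
          obtain ⟨jN, h1, h2, h3, h4, h5⟩ := ih h
          refine ⟨jN, h1, by omega, by omega, h4, ?_⟩
          intro k hk1 hk2
          rcases Nat.eq_or_lt_of_le hk1 with rfl | hlt
          · exact hin
          · exact h5 k hlt hk2

-- a non-empty prefix at i forces i < length
lemma pvCond_lt_length {t : List Char} {i : Nat} {s : String} (h : pvCond t i s) :
    i < t.length := by
  obtain ⟨h1, h2⟩ := h
  have hne : s.toList ≠ [] := fun he => h1 (String.toList_inj.mp (by rw [he]; rfl))
  have hlen := h2.length_le
  rw [List.length_drop] at hlen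
  have hpos : 0 < s.toList.length := List.length_pos_iff.mpr hne
  omega

-- A-side: if no valid sequence, fold from none stays none
lemma pvAFold_none {t : String} : ∀ {seqs : List String},
    (∀ s ∈ seqs, s ≠ "" → PySem.Str.find t s < 0) →
    pvAFold t seqs none = none := by
  intro seqs
  induction seqs with
  | nil => intro _; rfl
  | cons a rest ih =>
      intro h
      have hrest := fun s hs => h s (List.mem_cons_of_mem a hs)
      simp only [pvAFold]
      split_ifs with h1 h2 h3
      · exact ih hrest
      · exact ih hrest
      · exact absurd (h a List.mem_cons_self h1) h2
      · exact absurd (h a List.mem_cons_self h1) h2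

-- A-side: an accumulator at index i is kept when no later find beats it
lemma pvAFold_keep {t : String} {i : Nat} {s : String} : ∀ {seqs : List String},
    (∀ s' ∈ seqs, s' ≠ "" → ¬ PySem.Str.find t s' < 0 → (i : Int) ≤ PySem.Str.find t s') →
    pvAFold t seqs (some ((i : Int), s)) = some ((i : Int), s) := by
  intro seqs
  induction seqs with
  | nil => intro _; rfl
  | cons a rest ih =>
      intro h
      have hrest : ∀ s' ∈ rest, s' ≠ "" → ¬ PySem.Str.find t s' < 0 → (i : Int) ≤ PySem.Str.find t s' :=
        fun s' hs' => h s' (List.mem_cons_of_mem a hs')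
      simp only [pvAFold, Option.elim, decide_eq_true_eq]
      split_ifs with h1 h2 h3
      · exact ih hrest
      · exact ih hrest
      · exact absurd (h a List.mem_cons_self h1 h2) (by omega)
      · exact ih hrest

-- A-side: over sequences whose find exceeds i, the accumulator index stays above i
lemma pvAFold_gt {t : String} {i : Nat} : ∀ {seqs : List String} {acc : Option (Int × String)},
    (∀ s' ∈ seqs, s' ≠ "" → ¬ PySem.Str.find t s' < 0 → (i : Int) < PySem.Str.find t s') →
    (acc = none ∨ ∃ j s0, acc = some (j, s0) ∧ (i : Int) < j) →
    (pvAFold t seqs acc = none ∨ ∃ j s0, pvAFold t seqs acc = some (j, s0) ∧ (i : Int) < j) := by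
  intro seqs
  induction seqs with
  | nil => intro acc _ hacc; exact hacc
  | cons a rest ih =>
      intro acc h hacc
      have hrest : ∀ s' ∈ rest, s' ≠ "" → ¬ PySem.Str.find t s' < 0 → (i : Int) < PySem.Str.find t s' :=
        fun s' hs' => h s' (List.mem_cons_of_mem a hs')
      simp only [pvAFold, Option.elim]
      split_ifs with h1 h2 h3
      · exact ih hrest hacc
      · exact ih hrest hacc
      · exact ih hrest (Or.inr ⟨_, _, rfl, h a List.mem_cons_self h1 h2⟩)
      · exact ih hrest hacc

lemma pvAFold_append {t : String} {l1 l2 : List String} : ∀ {acc : Option (Int × String)},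
    pvAFold t (l1 ++ l2) acc = pvAFold t l2 (pvAFold t l1 acc) := by
  induction l1 with
  | nil => intro acc; rfl
  | cons a rest ih =>
      intro acc
      simp only [List.cons_append, pvAFold]
      split_ifs <;> exact ih

-- A-side: the first sequence achieving the minimal find index wins
lemma pvAFold_min {t : String} {i : Nat} {s : String} {pre post : List String}
    (hs : s ≠ "") (hf : PySem.Str.find t s = (i : Int))
    (hpre : ∀ s' ∈ pre, s' ≠ "" → ¬ PySem.Str.find t s' < 0 → (i : Int) < PySem.Str.find t s')
    (hpost : ∀ s' ∈ post, s' ≠ "" → ¬ PySem.Str.find t s' < 0 → (i : Int) ≤ PySem.Str.find t s') :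
    pvAFold t (pre ++ s :: post) none = some ((i : Int), s) := by
  rw [pvAFold_append]
  rcases pvAFold_gt (i := i) hpre (Or.inl rfl) with hnone | ⟨j, s0, hsome, hj⟩
  · rw [hnone]
    simp only [pvAFold, hf, Option.elim]
    rw [if_neg hs, if_neg (by omega), if_pos trivial]
    exact pvAFold_keep hpost
  · rw [hsome]
    simp only [pvAFold, hf, Option.elim, decide_eq_true_eq]
    rw [if_neg hs, if_neg (by omega), if_pos (by omega)]
    exact pvAFold_keep hpost

-- the two characterizations of 'sequence s occurs at position jN' agree
lemma pvFind_eq {t : List Char} {s : String} {jN : Nat}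
    (hpref : s.toList <+: t.drop jN)
    (hmin : ∀ m, m < jN → ¬ s.toList <+: t.drop m) :
    PySem.Chars.find t s.toList = (jN : Int) := by
  have hnn : 0 ≤ PySem.Chars.find t s.toList := by
    rw [PySem.Chars.find_nonneg_iff]
    rw [← PySem.Chars.isIn_iff_infix, ← PySem.Chars.exists_prefix_drop_iff_isIn]
    exact ⟨jN, hpref⟩
  obtain ⟨hp, hm⟩ := PySem.Chars.find_spec hnn
  have h1 : ¬ (PySem.Chars.find t s.toList).toNat < jN := fun hlt => hmin _ hlt hp
  have h2 : ¬ jN < (PySem.Chars.find t s.toList).toNat := fun hlt => hm jN hlt hpref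
  omega

-- ===== VERDICT (by name: the statement is the Claim_ definition above) =====
theorem find_earliest_stop_sequence_py_spec : Claim_equal_find_earliest_stop_sequence_py := by
  intro text stop_sequences _
  unfold Spec_find_earliest_stop_sequence_py find_earliest_stop_sequence_py find_earliest_stop_sequence_py_alt
  set seqs := (match stop_sequences with | none => [] | some l => l) with hseqs
  cases hB : pvAltOuter text.toList seqs 0 text.toList.length with
  | none =>
      apply pvAFold_none
      intro s hs hne
      by_contra hge
      have hinf : 0 ≤ PySem.Chars.find text.toList s.toList := by
        simp only [PySem.Str.find_eq] at hge; omega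
      rw [PySem.Chars.find_nonneg_iff, ← PySem.Chars.isIn_iff_infix,
        ← PySem.Chars.exists_prefix_drop_iff_isIn] at hinf
      obtain ⟨j, hj⟩ := hinf
      have hcond : pvCond text.toList j s := ⟨hne, hj⟩
      have hlt := pvCond_lt_length hcond
      exact pvInner_none (pvOuter_none hB j (by omega) (by omega)) s hs hcond
  | some r =>
      obtain ⟨jN, hr1, _, hjlt, hin, hbefore⟩ := pvOuter_some hB
      obtain ⟨⟨hne, hpref⟩, pre, post, hdec, hpre⟩ := pvInner_some hin
      have hmem : ∀ s', s' ∈ pre ∨ s' ∈ post → s' ∈ seqs := by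
        intro s' h'; rw [hdec]; rcases h' with h' | h'
        · exact List.mem_append_left _ h'
        · exact List.mem_append_right _ (List.mem_cons_of_mem _ h')
      -- no sequence in seqs occurs at any position before jN
      have hnoearly : ∀ s', s' ∈ seqs → s' ≠ "" → ∀ m, m < jN → ¬ s'.toList <+: text.toList.drop m := by
        intro s' hs' hne' m hm hp
        exact pvInner_none (hbefore m (by omega) hm) s' hs' ⟨hne', hp⟩
      have hsmem : r.2 ∈ seqs := by rw [hdec]; exact List.mem_append_right _ List.mem_cons_self
      have hfind : PySem.Chars.find text.toList r.2.toList = (jN : Int) :=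
        pvFind_eq hpref (fun m hm => hnoearly r.2 hsmem hne m hm)
      -- the find index of any valid sequence, as a position, is ≥ jN; strictly > for sequences before r.2
      have hge : ∀ s', s' ∈ seqs → s' ≠ "" → ¬ PySem.Str.find text s' < 0 →
          (jN : Int) ≤ PySem.Str.find text s' := by
        intro s' hs' hne' hnn
        have hnn' : 0 ≤ PySem.Chars.find text.toList s'.toList := by
          simp only [PySem.Str.find_eq] at hnn; omega
        obtain ⟨hp, _⟩ := PySem.Chars.find_spec hnn'
        have : ¬ (PySem.Chars.find text.toList s'.toList).toNat < jN :=
          fun hlt => hnoearly s' hs' hne' _ hlt hp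
        simp only [PySem.Str.find_eq]
        omega
      rw [hdec, pvAFold_min hne (by simpa using hfind)
        (fun s' hs' hne' hnn => lt_of_le_of_ne (hge s' (hmem s' (Or.inl hs')) hne' hnn)
          (fun heq => hpre s' hs' ⟨hne', by
            have hnn' : 0 ≤ PySem.Chars.find text.toList s'.toList := by
              simp only [PySem.Str.find_eq] at hnn; omega
            obtain ⟨hp, _⟩ := PySem.Chars.find_spec hnn'
            have : (PySem.Chars.find text.toList s'.toList).toNat = jN := by
              simp only [PySem.Str.find_eq] at heq; omega
            rwa [this] at hp⟩))
        (fun s' hs' hne' hnn => hge s' (hmem s' (Or.inr hs')) hne' hnn)]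
      rw [← hr1]
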